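-- pv_equiv track=rewrite | github.com/pypi-data/pypi-mirror-256 | packages/dyff/dyff-0.12.0.tar.gz/dyff-0.12.0/scripts/generate-config-listing.py | render_section_heading
-- ===== SOURCE A (Python) =====
-- from typing import Any, List, Optional, Tuple
--
-- def render_heading(text: str, level: int = 0) -> str:
--     char: str = {
--         0: "=",
--         1: "-",
--         2: "~",
--         3: "`",
--         4: "'",
--     }[level]
--     return f"{text}\n" f"{char * len(text)}"
--
-- def render_section_heading(
--     sections: Tuple[str], previous: Optional[Tuple[str]] = None
-- ) -> List[str]:
--     if previous is None:
--         previous = tuple()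
--
--     # do nothing if fully matching
--     if previous == sections:
--         return []
--
--     min_sections = min(len(previous), len(sections))
--
--     index = 0
--     while index < min_sections:
--         if previous[index] != sections[index]:
--             break
--         index += 1
--
--     headings = []
--     for level in range(len(sections)):
--         if previous[: level + 1] == sections[: level + 1]:
--             continue
--         headings.append(
--             render_heading(text=".".join(sections[: level + 1]), level=level + 1)
--         )
--     return headings
-- ===== SOURCE B (Python) =====
-- def render_heading(text: str, level: int = 0) -> str:
--     char: str = {
--         0: "=",
--         1: "-",
--         2: "~",
--         3: "`",
--         4: "'",
--     }[level]
--     return f"{text}\n" f"{char * len(text)}"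
--
--
-- def render_section_heading(sections, previous=None):
--     # One recursive pass that consumes `previous` and `sections` in lockstep,
--     # building the dotted heading text incrementally (no slicing, no joins of
--     # prefixes, no divergence index). While the heads match, descend without
--     # emitting; from the first mismatch on, emit a heading at every level.
--     def go(prev, secs, prefix, level):
--         if not secs:
--             return []
--         head, rest = secs[0], secs[1:]
--         text = head if prefix is None else prefix + "." + head
--         if prev and prev[0] == head:
--             return go(prev[1:], rest, text, level + 1)
--         return [render_heading(text, level)] + go((), rest, text, level + 1)
--
--     return go(previous if previous is not None else (), sections, None, 1)
-- ===== Notes on version B (the rewrite author's own statement) =====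
-- stated objective: simpler
-- what changed: B replaces A's staged passes (early full-equality return, dead while-loop index scan, then a loop that re-slices and re-joins both lists at every level) by a single recursive descent that consumes previous and sections in lockstep, building the dotted heading text incrementally and switching to emit-everything once the heads first differ; Pre_ excludes only the inputs where render_heading's level dict raises KeyError (more than 4 diverging section levels).
import Mathlib
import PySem

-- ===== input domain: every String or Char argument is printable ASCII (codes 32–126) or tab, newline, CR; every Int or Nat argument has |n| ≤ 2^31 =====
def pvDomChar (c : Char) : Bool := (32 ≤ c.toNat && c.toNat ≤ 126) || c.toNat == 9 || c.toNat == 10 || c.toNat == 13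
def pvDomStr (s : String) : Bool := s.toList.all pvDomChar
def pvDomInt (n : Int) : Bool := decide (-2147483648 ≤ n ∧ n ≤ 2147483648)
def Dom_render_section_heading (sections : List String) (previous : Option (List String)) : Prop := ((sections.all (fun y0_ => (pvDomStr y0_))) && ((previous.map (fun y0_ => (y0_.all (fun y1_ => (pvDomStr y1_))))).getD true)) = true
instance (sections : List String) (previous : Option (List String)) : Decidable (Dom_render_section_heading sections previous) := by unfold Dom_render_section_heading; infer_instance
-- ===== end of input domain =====

-- B replaces A's early-equality return, dead while loop and per-level slice-and-join passes
-- by ONE recursive descent over both lists in lockstep that builds the dotted text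
-- incrementally; objective: simpler. Pre_ excludes exactly the inputs on which Python A
-- raises KeyError in render_heading.

-- ===== PORT A =====
-- shared helper: render_heading (identical in Source A and Source B).
-- The {0:"=",…,4:"'"}[level] dict lookup raises KeyError in Python for level ∉ 0..4;
-- the none branch returns "" there, which is unreachable under Pre_.
def headingChar (level : Nat) : Option Char :=
  if level = 0 then some '='
  else if level = 1 then some '-'
  else if level = 2 then some '~'
  else if level = 3 then some '`'
  else if level = 4 then some '\'' else none

def renderHeading (text : String) (level : Nat) : String :=
  match headingChar level with
  | some c => text ++ "\n" ++ String.ofList (List.replicate (PySem.Str.len text).toNat c)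
  | none => ""  -- Python raises KeyError here; excluded by Pre_

-- A's while loop 'while index < min_sections: if previous[index] != sections[index]: break; index += 1'
def whileIndexA (prev secs : List String) (minSections : Nat) (index : Nat) : Nat :=
  if index < minSections then
    if prev.getD index "" ≠ secs.getD index "" then index
    else whileIndexA prev secs minSections (index + 1)
  else index
termination_by minSections - index

def render_section_heading (sections : List String) (previous : Option (List String)) : List String :=
  let prev := match previous with | none => [] | some p => p
  if prev = sections then []
  else
    let minSections := min prev.length sections.length
    let _index := whileIndexA prev sections minSections 0  -- computed but never used in A
    let headings := (List.range sections.length).foldl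
      (fun acc level =>
        if prev.take (level + 1) = sections.take (level + 1) then acc
        else acc ++ [renderHeading (PySem.Str.join "." (sections.take (level + 1))) (level + 1)]) []
    headings

-- ===== PORT B =====
-- B's inner function go(prev, secs, prefix, level): consume both lists in lockstep,
-- building the dotted text incrementally; once the heads differ (or prev is exhausted),
-- emit a heading at every remaining level.
def goB : List String → List String → Option String → Nat → List String
  | _, [], _, _ => []
  | prev, s :: ss, pfx, level =>
    let text := match pfx with | none => s | some p => p ++ "." ++ s
    match prev with
    | p :: ps =>
      if p = s then goB ps ss (some text) (level + 1)
      else renderHeading text level :: goB [] ss (some text) (level + 1)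
    | [] => renderHeading text level :: goB [] ss (some text) (level + 1)

def render_section_heading_alt (sections : List String) (previous : Option (List String)) : List String :=
  goB (match previous with | none => [] | some p => p) sections none 1

-- ===== PRECONDITION & SPEC =====
-- Pre_ excludes exactly the inputs where Python A raises KeyError (render_heading called
-- with level > 4, i.e. more than 4 section levels and sections not a prefix of previous).
def Pre_render_section_heading (sections : List String) (previous : Option (List String)) : Prop :=
  sections.length ≤ 4 ∨ sections <+: (previous.getD [])
instance (sections : List String) (previous : Option (List String)) : Decidable (Pre_render_section_heading sections previous) := by unfold Pre_render_section_heading; infer_instance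
def pvWitness_render_section_heading : List String × Option (List String) :=
  (["api", "config"], some ["api", "auth"])

def Spec_render_section_heading (sections : List String) (previous : Option (List String)) (out : List String) : Prop := out = render_section_heading_alt sections previous
instance (sections : List String) (previous : Option (List String)) (out : List String) : Decidable (Spec_render_section_heading sections previous out) := by unfold Spec_render_section_heading; infer_instance

-- ===== CLAIM (what is proved, stated in full; the proofs are below) =====
def Claim_equal_render_section_heading : Prop := ∀ (sections : List String) (previous : Option (List String)), Dom_render_section_heading sections previous → Pre_render_section_heading sections previous → Spec_render_section_heading sections previous (render_section_heading sections previous)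

-- ===== LEMMAS AND PROOFS =====

-- proof-only helper: the length of the longest common prefix of two lists
def divergeIdx : List String → List String → Nat
  | a :: as, b :: bs => if a = b then divergeIdx as bs + 1 else 0
  | _, _ => 0

-- proof-only helper: the common normal form of both ports
def rangeForm (sections : List String) (d : Nat) : List String :=
  (List.range' d (sections.length - d)).map
    (fun level => renderHeading (PySem.Str.join "." (sections.take (level + 1))) (level + 1))

-- the divergence index with an exhausted previous list is 0
theorem divergeIdx_nil (ss : List String) : divergeIdx [] ss = 0 := by
  cases ss <;> rfl

-- the divergence index of a list with itself is its length
theorem divergeIdx_self (l : List String) : divergeIdx l l = l.length := by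
  induction l with
  | nil => simp [divergeIdx]
  | cons a as ih => simp [divergeIdx, ih]

-- prefix-equality at k characterized by the divergence index (for k within sections)
theorem take_eq_iff (prev secs : List String) (k : Nat) (hk : k ≤ secs.length) :
    prev.take k = secs.take k ↔ k ≤ divergeIdx prev secs := by
  induction secs generalizing prev k with
  | nil =>
    have : k = 0 := by simpa using hk
    subst this; simp
  | cons b bs ih =>
    cases k with
    | zero => simp
    | succ k' =>
      cases prev with
      | nil => simp [divergeIdx]
      | cons a as =>
        simp only [List.take_succ_cons, List.cons.injEq]
        by_cases hab : a = b
        · subst hab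
          have hd : divergeIdx (a :: as) (a :: bs) = divergeIdx as bs + 1 := by
            simp [divergeIdx]
          rw [hd, ih as k' (by simpa using hk)]
          exact ⟨fun ⟨_, h2⟩ => by omega, fun h2 => ⟨rfl, by omega⟩⟩
        · have hd : divergeIdx (a :: as) (b :: bs) = 0 := by simp [divergeIdx, hab]
          simp [hab, hd]

-- 'if cond: continue else: out.append(f(x))' as filter + map
theorem foldl_skip_append (f : Nat → String) (p : Nat → Prop) [DecidablePred p]
    (l : List Nat) (acc : List String) :
    l.foldl (fun acc x => if p x then acc else acc ++ [f x]) acc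
      = acc ++ (l.filter (fun x => !decide (p x))).map f := by
  induction l generalizing acc with
  | nil => simp
  | cons x xs ih =>
    simp only [List.foldl_cons, List.filter_cons]
    by_cases hx : p x
    · simp [hx, ih]
    · simp [hx, ih]

-- the filtered range of levels with level + 1 > d is range' d (n - d)
theorem range_filter_ge (n d : Nat) :
    (List.range n).filter (fun l => !decide (l + 1 ≤ d)) = List.range' d (n - d) := by
  induction n with
  | zero => simp
  | succ m ih =>
    rw [List.range_succ, List.filter_append, ih]
    by_cases h : m + 1 ≤ d
    · have h1 : m + 1 - d = 0 := by omega
      have h2 : m - d = 0 := by omega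
      simp_all
    · have h1 : m + 1 - d = (m - d) + 1 := by omega
      rw [h1, List.range'_1_concat]
      have h2 : d + (m - d) = m := by omega
      simp [h2]
      omega

-- A's loop body equals the normal form, for any prev
theorem loop_eq (prev sections : List String) :
    (List.range sections.length).foldl
      (fun acc level =>
        if prev.take (level + 1) = sections.take (level + 1) then acc
        else acc ++ [renderHeading (PySem.Str.join "." (sections.take (level + 1))) (level + 1)]) []
    = rangeForm sections (divergeIdx prev sections) := by
  rw [foldl_skip_append]
  rw [List.filter_congr (fun x hx => by
    have hx' : x + 1 ≤ sections.length := by simpa using List.mem_range.mp hx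
    show (!decide (prev.take (x + 1) = sections.take (x + 1)))
        = (!decide (x + 1 ≤ divergeIdx prev sections))
    simp [take_eq_iff prev sections (x + 1) hx'])]
  rw [range_filter_ge]
  simp [rangeForm]

-- intercalate over two or more pieces peels off the first
theorem ic_cons2 (sep a b : List Char) (l : List (List Char)) :
    List.intercalate sep (a :: b :: l) = a ++ sep ++ List.intercalate sep (b :: l) := by
  simp [List.intercalate, List.intersperse]

-- appending one piece to a nonempty intercalation appends sep ++ piece
theorem ic_snoc (sep x : List Char) : ∀ (a : List Char) (as : List (List Char)),
    List.intercalate sep (a :: (as ++ [x])) = List.intercalate sep (a :: as) ++ sep ++ x := by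
  intro a as
  induction as generalizing a with
  | nil => simp [List.intercalate, List.intersperse]
  | cons b bs ih =>
    have h := ih b
    simp only [List.cons_append]
    rw [ic_cons2, h, ic_cons2]
    simp

-- proof-only helper: the prefix string B's go carries after consuming acc
def prefOf (acc : List String) : Option String :=
  match acc with
  | [] => none
  | _ :: _ => some (PySem.Str.join "." acc)

-- extending the carried prefix by one section is joining the extended list
theorem prefOf_snoc (acc : List String) (s : String) :
    (match prefOf acc with | none => s | some p => p ++ "." ++ s)
      = PySem.Str.join "." (acc ++ [s]) := by
  cases acc with
  | nil =>
    simp [prefOf, PySem.Str.join, PySem.Chars.join, List.intercalate, List.intersperse]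
  | cons a as =>
    simp only [prefOf, PySem.Str.join, PySem.Chars.join, List.map_append, List.map_cons,
      List.map_nil, List.cons_append]
    rw [ic_snoc]
    simp only [String.ofList_append]
    first
      | rw [String.ofList_toList, String.ofList_toList]
      | (rw [show ('.' :: s.toList) = ".".toList ++ s.toList from by simp]
         rw [String.ofList_append, String.ofList_toList, String.ofList_toList])

-- B's recursion computes the normal form shifted by the consumed prefix
theorem goB_eq (ss : List String) : ∀ (prev acc : List String),
    goB prev ss (prefOf acc) (acc.length + 1)
      = (List.range' (acc.length + divergeIdx prev ss) (ss.length - divergeIdx prev ss)).map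
          (fun level =>
            renderHeading (PySem.Str.join "." ((acc ++ ss).take (level + 1))) (level + 1)) := by
  induction ss with
  | nil => intro prev acc; simp [goB]
  | cons s ss' ih =>
    intro prev acc
    have hpref : prefOf (acc ++ [s]) = some (PySem.Str.join "." (acc ++ [s])) := by
      cases acc <;> simp [prefOf]
    have hlen : (acc ++ [s]).length = acc.length + 1 := by simp
    have hccat : acc ++ s :: ss' = (acc ++ [s]) ++ ss' := by simp
    have htext : (match prefOf acc with | none => s | some p => p ++ "." ++ s)
        = PySem.Str.join "." (acc ++ [s]) := prefOf_snoc acc s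
    have htail : goB [] ss' (some (PySem.Str.join "." (acc ++ [s]))) (acc.length + 1 + 1)
        = (List.range' (acc.length + 1) ss'.length).map
            (fun level =>
              renderHeading (PySem.Str.join "." ((acc ++ s :: ss').take (level + 1))) (level + 1)) := by
      have h2 := ih [] (acc ++ [s])
      rw [hpref, hlen, divergeIdx_nil] at h2
      simp only [Nat.add_zero, Nat.sub_zero] at h2
      rw [h2, hccat]
    have hhead : renderHeading (PySem.Str.join "." (acc ++ [s])) (acc.length + 1)
        = renderHeading (PySem.Str.join "." ((acc ++ s :: ss').take (acc.length + 1)))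
            (acc.length + 1) := by
      have h3 : (acc ++ s :: ss').take (acc.length + 1) = acc ++ [s] := by
        rw [hccat, ← hlen, List.take_left]
      rw [h3]
    cases prev with
    | nil =>
      simp only [goB]
      rw [htext, htail, hhead, divergeIdx_nil]
      simp [List.range'_succ]
    | cons p ps =>
      by_cases hps : p = s
      · simp only [goB]
        rw [if_pos hps, htext]
        have h2 := ih ps (acc ++ [s])
        rw [hpref, hlen] at h2
        have hdd : divergeIdx (p :: ps) (s :: ss') = divergeIdx ps ss' + 1 := by
          simp [divergeIdx, hps]
        rw [hdd]
        have e1 : acc.length + (divergeIdx ps ss' + 1) = acc.length + 1 + divergeIdx ps ss' := by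
          omega
        have e2 : (s :: ss').length - (divergeIdx ps ss' + 1) = ss'.length - divergeIdx ps ss' := by
          simp
        rw [e1, e2, hccat]
        exact h2
      · simp only [goB]
        rw [if_neg hps, htext, htail, hhead]
        have hdd : divergeIdx (p :: ps) (s :: ss') = 0 := by simp [divergeIdx, hps]
        rw [hdd]
        simp [List.range'_succ]

-- B's port equals the normal form
theorem alt_eq (sections : List String) (previous : Option (List String)) :
    render_section_heading_alt sections previous
      = rangeForm sections (divergeIdx (match previous with | none => [] | some p => p) sections) := by
  unfold render_section_heading_alt rangeForm
  have := goB_eq sections (match previous with | none => [] | some p => p) []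
  simpa [prefOf] using this

theorem ports_agree (sections : List String) (previous : Option (List String)) :
    render_section_heading sections previous = render_section_heading_alt sections previous := by
  rw [alt_eq]
  unfold render_section_heading
  cases previous with
  | none =>
    simp only
    by_cases h : ([] : List String) = sections
    · rw [if_pos h]; rw [← h]; simp [rangeForm, divergeIdx]
    · rw [if_neg h]; exact loop_eq [] sections
  | some prev =>
    simp only
    by_cases h : prev = sections
    · rw [if_pos h]; subst h; simp [rangeForm, divergeIdx_self]
    · rw [if_neg h]; exact loop_eq prev sections

-- ===== VERDICT (by name: the statement is the Claim_ definition above) =====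
theorem render_section_heading_spec : Claim_equal_render_section_heading := by
  intro sections previous _ _
  unfold Spec_render_section_heading
  exact ports_agree sections previous
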